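-- pv_equiv track=rewrite | github.com/jareklaskowski7/variousPythonPrograms | Triangle01.py | createTriangle01
-- ===== SOURCE A (Python) =====
-- def createTriangle01(triangle01Height):
--     triangle01 = str()
--     x = 0
--     for rowNum in range(triangle01Height):
--         for rowLength in range(rowNum + 1):
--             triangle01 += str(x)
--             if x == 0:
--                 x = 1
--             else:
--                 x = 0
--         triangle01 += "\n"
--
--     return triangle01
-- ===== SOURCE B (Python) =====
-- def createTriangle01(triangle01Height):
--     rows = []
--     for rowNum in range(triangle01Height):
--         start = rowNum * (rowNum + 1) // 2
--         rows.append(''.join(str((start + j) % 2) for j in range(rowNum + 1)) + "\n")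
--     return ''.join(rows)
-- ===== Notes on version B (the rewrite author's own statement) =====
-- stated objective: alternative
-- what changed: B drops A's mutable running toggle bit and per-character string concatenation; each row is computed independently from the parity of its triangular-number start index and the rows are joined once.
import Mathlib
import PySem

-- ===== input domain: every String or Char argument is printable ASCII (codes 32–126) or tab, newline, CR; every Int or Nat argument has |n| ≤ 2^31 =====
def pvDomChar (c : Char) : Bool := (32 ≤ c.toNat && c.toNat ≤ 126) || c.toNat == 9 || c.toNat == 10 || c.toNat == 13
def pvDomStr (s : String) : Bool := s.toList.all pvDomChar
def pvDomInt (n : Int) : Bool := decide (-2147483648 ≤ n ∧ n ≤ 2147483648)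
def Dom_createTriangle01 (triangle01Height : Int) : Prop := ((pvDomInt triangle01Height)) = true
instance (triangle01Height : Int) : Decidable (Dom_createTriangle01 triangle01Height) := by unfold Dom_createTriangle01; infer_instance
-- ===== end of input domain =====

-- B replaces A's mutable running 0/1 toggle by computing each row independently
-- from its triangular-number start index (objective: alternative decomposition).

-- ===== PORT A =====
def createTriangle01 (triangle01Height : Int) : String :=
  ((PySem.List.pyRange 0 triangle01Height 1).foldl
    (fun (st : String × Int) rowNum =>
      let st2 := (PySem.List.pyRange 0 (rowNum + 1) 1).foldl
        (fun (st : String × Int) _rowLength =>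
          (st.1 ++ PySem.Int.toStr st.2, if st.2 = 0 then 1 else 0)) st
      (st2.1 ++ "\n", st2.2))
    ("", 0)).1

-- ===== PORT B =====
def createTriangle01_alt (triangle01Height : Int) : String :=
  String.join ((PySem.List.pyRange 0 triangle01Height 1).map (fun rowNum =>
    let start := PySem.Int.floordiv (rowNum * (rowNum + 1)) 2
    String.join ((PySem.List.pyRange 0 (rowNum + 1) 1).map
      (fun j => PySem.Int.toStr (PySem.Int.mod (start + j) 2))) ++ "\n"))

-- ===== PRECONDITION & SPEC =====
def Spec_createTriangle01 (triangle01Height : Int) (out : String) : Prop := out = createTriangle01_alt triangle01Height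
instance (triangle01Height : Int) (out : String) : Decidable (Spec_createTriangle01 triangle01Height out) := by unfold Spec_createTriangle01; infer_instance

-- ===== CLAIM (what is proved, stated in full; the proofs are below) =====
def Claim_equal_createTriangle01 : Prop := ∀ (triangle01Height : Int), Dom_createTriangle01 triangle01Height → Spec_createTriangle01 triangle01Height (createTriangle01 triangle01Height)

-- ===== LEMMAS AND PROOFS =====

-- proof-only helpers: the alternating string A's inner loop emits and its final toggle
def pvTog (x : Int) : Int := if x = 0 then 1 else 0

def pvAlt (x : Int) : Nat → String
  | 0 => ""
  | (L+1) => PySem.Int.toStr x ++ pvAlt (pvTog x) L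

def pvEnd (x : Int) : Nat → Int
  | 0 => x
  | (L+1) => pvEnd (pvTog x) L

theorem pv_foldl_append_str (l : List String) : ∀ a : String,
    List.foldl (· ++ ·) a l = a ++ List.foldl (· ++ ·) "" l := by
  induction l with
  | nil => intro a; simp
  | cons b l ih =>
    intro a
    simp only [List.foldl_cons]
    rw [ih (a ++ b), ih ("" ++ b)]
    simp [String.append_assoc]

theorem pv_join_cons (s : String) (l : List String) :
    String.join (s :: l) = s ++ String.join l := by
  show List.foldl (· ++ ·) "" (s :: l) = s ++ List.foldl (· ++ ·) "" l
  rw [List.foldl_cons, pv_foldl_append_str]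
  simp

theorem pv_join_concat (l : List String) (s : String) :
    String.join (l ++ [s]) = String.join l ++ s := by
  show List.foldl (· ++ ·) "" (l ++ [s]) = _
  rw [List.foldl_append]
  simp [String.join]

theorem pvEnd_parity (L : Nat) : ∀ x : Int, x = 0 ∨ x = 1 → pvEnd x L = (x + L) % 2 := by
  induction L with
  | zero => rintro x (rfl | rfl) <;> simp [pvEnd]
  | succ L ih =>
    rintro x (rfl | rfl) <;>
      simp only [pvEnd, pvTog, reduceIte, one_ne_zero] <;>
      rw [ih _ (by norm_num)] <;> push_cast <;> omega

theorem inner_fold (l : List Int) : ∀ (s : String) (x : Int),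
    (l.foldl (fun (st : String × Int) _ =>
      (st.1 ++ PySem.Int.toStr st.2, if st.2 = 0 then 1 else 0)) (s, x))
    = (s ++ pvAlt x l.length, pvEnd x l.length) := by
  induction l with
  | nil => intro s x; simp [pvAlt, pvEnd]
  | cons a l ih =>
    intro s x
    simp only [List.foldl_cons, List.length_cons, pvAlt, pvEnd, ih, String.append_assoc, pvTog]

theorem rowB_alt (n : Nat) : ∀ (t a : Int),
    String.join ((PySem.List.pyRange a (a + n) 1).map
      (fun j => PySem.Int.toStr (PySem.Int.mod (t + j) 2)))
    = pvAlt (PySem.Int.mod (t + a) 2) n := by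
  induction n with
  | zero =>
    intro t a
    rw [PySem.List.pyRange_one_eq_nil (by omega)]
    rfl
  | succ n ih =>
    intro t a
    rw [show a + ((n + 1 : Nat) : Int) = a + 1 + (n : Int) by push_cast; ring]
    rw [PySem.List.pyRange_one_cons (by omega), List.map_cons, pv_join_cons, ih t (a + 1)]
    have htog : PySem.Int.mod (t + (a + 1)) 2 = pvTog (PySem.Int.mod (t + a) 2) := by
      rw [PySem.Int.mod_eq_emod_of_pos (by norm_num),
        PySem.Int.mod_eq_emod_of_pos (by norm_num), pvTog]
      split_ifs with h <;> omega
    rw [htog]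
    simp [pvAlt]

-- A's outer loop after n rows: B's first n rows, and the toggle is the parity of T(n) = n(n+1)/2
theorem outer_fold (n : Nat) :
    ((PySem.List.pyRange 0 (n : Int) 1).foldl
      (fun (st : String × Int) rowNum =>
        let st2 := (PySem.List.pyRange 0 (rowNum + 1) 1).foldl
          (fun (st : String × Int) _ =>
            (st.1 ++ PySem.Int.toStr st.2, if st.2 = 0 then 1 else 0)) st
        (st2.1 ++ "\n", st2.2))
      ("", 0))
    = (String.join ((PySem.List.pyRange 0 (n : Int) 1).map (fun rowNum =>
        let start := PySem.Int.floordiv (rowNum * (rowNum + 1)) 2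
        String.join ((PySem.List.pyRange 0 (rowNum + 1) 1).map
          (fun j => PySem.Int.toStr (PySem.Int.mod (start + j) 2))) ++ "\n")),
       (((n * (n + 1) / 2) % 2 : Nat) : Int)) := by
  induction n with
  | zero =>
    simp only [Nat.cast_zero]
    rw [PySem.List.pyRange_one_eq_nil (le_refl 0)]
    rfl
  | succ n ih =>
    have hsplit : PySem.List.pyRange 0 ((n + 1 : Nat) : Int) 1
        = PySem.List.pyRange 0 (n : Int) 1 ++ [(n : Int)] := by
      push_cast
      exact PySem.List.pyRange_one_succ_right (by positivity)
    rw [hsplit, List.foldl_append, ih, List.map_append, List.foldl_cons, List.foldl_nil]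
    have hlen : (PySem.List.pyRange 0 ((n : Int) + 1) 1).length = n + 1 := by
      rw [PySem.List.length_pyRange_one]; omega
    simp only [inner_fold, hlen, List.map_cons, List.map_nil, pv_join_concat]
    have hrow : String.join ((PySem.List.pyRange 0 ((n : Int) + 1) 1).map
          (fun j => PySem.Int.toStr (PySem.Int.mod
            (PySem.Int.floordiv ((n : Int) * ((n : Int) + 1)) 2 + j) 2)))
        = pvAlt ((((n * (n + 1) / 2) % 2 : Nat) : Int)) (n + 1) := by
      have hc := rowB_alt (n + 1) (PySem.Int.floordiv ((n : Int) * ((n : Int) + 1)) 2) 0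
      rw [show (0 : Int) + ((n + 1 : Nat) : Int) = (n : Int) + 1 by push_cast; ring,
        add_zero] at hc
      rw [hc]
      congr 1
      rw [show (n : Int) * ((n : Int) + 1) = ((n * (n + 1) : Nat) : Int) by push_cast; ring]
      rw [show ((2 : Int)) = ((2 : Nat) : Int) from rfl, PySem.Int.floordiv_natCast,
        PySem.Int.mod_natCast]
    have hend : pvEnd ((((n * (n + 1) / 2) % 2 : Nat) : Int)) (n + 1)
        = ((((n + 1) * (n + 1 + 1) / 2) % 2 : Nat) : Int) := by
      rw [pvEnd_parity _ _ (by omega)]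
      have hdvd : 2 ∣ n * (n + 1) := (Nat.even_mul_succ_self n).two_dvd
      have hstep : (n + 1) * (n + 1 + 1) / 2 = n * (n + 1) / 2 + (n + 1) := by
        obtain ⟨k, hk⟩ := hdvd
        have h2 : (n + 1) * (n + 1 + 1) = 2 * (k + (n + 1)) := by nlinarith
        rw [h2, hk]
        omega
      rw [hstep]
      push_cast
      omega
    rw [hrow, hend]
    simp [String.append_assoc]

theorem heights_agree (h : Int) : createTriangle01 h = createTriangle01_alt h := by
  unfold createTriangle01 createTriangle01_alt
  by_cases hle : h ≤ 0
  · rw [PySem.List.pyRange_one_eq_nil hle]; rfl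
  · rw [show h = ((h.toNat : Nat) : Int) by omega]
    rw [congrArg Prod.fst (outer_fold h.toNat)]

-- ===== VERDICT (by name: the statement is the Claim_ definition above) =====
theorem createTriangle01_spec : Claim_equal_createTriangle01 := by
  intro h _
  unfold Spec_createTriangle01
  exact heights_agree h
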